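-- pv_equiv track=rewrite | github.com/llhert30/thirteen-moves | thirteen_moves/ai.py | position_id
-- ===== SOURCE A (Python) =====
-- def position_id(tiles):
--     stiles = sorted(tiles)
--     if not stiles:
--         return 0
--     s = stiles[0]
--     n = s+0
--     for tile in stiles[1:]:
--         s *= 16
--         s += (tile-n)
--     return s
-- ===== SOURCE B (Python) =====
-- def position_id(tiles):
--     stiles = sorted(tiles)
--     if not stiles:
--         return 0
--     first = stiles[0]
--     digits = [first] + [t - first for t in stiles[1:]]
--     pows = [1]
--     for _ in range(len(digits) - 1):
--         pows.append(pows[-1] * 16)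
--     return sum(d * p for d, p in zip(digits, reversed(pows)))
-- ===== Notes on version B (the rewrite author's own statement) =====
-- stated objective: alternative
-- what changed: Replaces the running multiply-accumulate Horner loop over the sorted tiles with an explicit digit list (minimum plus offsets) evaluated as a sum of digits times explicit powers of 16.
import Mathlib
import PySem

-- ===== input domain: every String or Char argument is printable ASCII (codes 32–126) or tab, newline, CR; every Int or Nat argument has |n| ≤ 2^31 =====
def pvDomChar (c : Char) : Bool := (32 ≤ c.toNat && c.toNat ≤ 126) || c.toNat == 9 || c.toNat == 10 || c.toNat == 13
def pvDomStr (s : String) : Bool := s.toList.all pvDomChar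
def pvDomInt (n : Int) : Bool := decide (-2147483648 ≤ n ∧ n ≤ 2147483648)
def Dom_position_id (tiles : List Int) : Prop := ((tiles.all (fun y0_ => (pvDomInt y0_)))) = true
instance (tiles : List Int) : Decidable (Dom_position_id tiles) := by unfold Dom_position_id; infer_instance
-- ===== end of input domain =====

-- B replaces A's Horner multiply-accumulate loop with an explicit digit list paired
-- against a precomputed table of powers of 16 (objective: alternative decomposition).

-- ===== PORT A =====
-- literal port of A: sort, take minimum, then the running s *= 16; s += tile - n loop
def position_id (tiles : List Int) : Int :=
  match PySem.List.sorted tiles (fun t => t) with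
  | [] => 0
  | s0 :: rest =>
    let n := s0 + 0
    rest.foldl (fun s tile => s * 16 + (tile - n)) s0

-- ===== PORT B =====
-- literal port of Source B: digit list [first] + offsets, powers table built by the
-- pows.append(pows[-1] * 16) loop, then sum(d * p for d, p in zip(digits, reversed(pows))).
-- pows[-1] is ported as getLastD 0: pows starts as [1] and only grows, so it is never
-- empty and the default is unreachable.
def position_id_alt (tiles : List Int) : Int :=
  match PySem.List.sorted tiles (fun t => t) with
  | [] => 0
  | first :: rest =>
    let digits := first :: rest.map (fun t => t - first)
    let pows := (List.range (digits.length - 1)).foldl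
      (fun pws _ => pws ++ [pws.getLastD 0 * 16]) [1]
    ((digits.zip pows.reverse).map (fun q => q.1 * q.2)).sum

-- ===== PRECONDITION & SPEC =====
def Spec_position_id (tiles : List Int) (out : Int) : Prop := out = position_id_alt tiles
instance (tiles : List Int) (out : Int) : Decidable (Spec_position_id tiles out) := by unfold Spec_position_id; infer_instance

-- ===== CLAIM (what is proved, stated in full; the proofs are below) =====
def Claim_equal_position_id : Prop := ∀ (tiles : List Int), Dom_position_id tiles → Spec_position_id tiles (position_id tiles)

-- ===== LEMMAS AND PROOFS =====

-- the powers table built by B's append loop is [16^0, 16^1, …, 16^n]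
theorem pv_pows (n : Nat) :
    (List.range n).foldl (fun pws _ => pws ++ [pws.getLastD 0 * 16]) ([1] : List Int)
      = (List.range (n + 1)).map (fun i => (16 : Int) ^ i) := by
  induction n with
  | zero => simp
  | succ n ih =>
    rw [List.range_succ, List.foldl_append, ih]
    rw [List.range_succ (n := n + 1), List.map_append]
    simp [List.range_succ, pow_succ]

-- value of a digit list zipped with the reversed powers table
def pvW (l : List Int) : Int :=
  ((l.zip (((List.range l.length).map (fun i => (16 : Int) ^ i)).reverse)).map
    (fun q => q.1 * q.2)).sum

theorem pvW_cons (x : Int) (l : List Int) : pvW (x :: l) = x * 16 ^ l.length + pvW l := by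
  unfold pvW
  rw [List.length_cons, List.range_succ, List.map_append, List.reverse_append]
  simp

-- Horner loop = head times top power plus value of the remaining digits
theorem pv_horner (l : List Int) : ∀ acc : Int,
    l.foldl (fun s d => s * 16 + d) acc = acc * 16 ^ l.length + pvW l := by
  induction l with
  | nil => intro acc; simp [pvW]
  | cons d l ih =>
    intro acc
    rw [List.foldl_cons, ih (acc * 16 + d), pvW_cons, List.length_cons, pow_succ]
    ring

-- ===== VERDICT (by name: the statement is the Claim_ definition above) =====
theorem position_id_spec : Claim_equal_position_id := by
  intro tiles _
  unfold Spec_position_id position_id position_id_alt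
  cases h : PySem.List.sorted tiles (fun t => t) with
  | nil => rfl
  | cons first rest =>
    simp only [List.length_cons, List.length_map, Nat.add_sub_cancel, pv_pows]
    have hB : (((first :: rest.map (fun t => t - first)).zip
          (((List.range (rest.length + 1)).map (fun i => (16 : Int) ^ i)).reverse)).map
          (fun q => q.1 * q.2)).sum
        = pvW (first :: rest.map (fun t => t - first)) := by
      unfold pvW; simp
    rw [hB, pvW_cons, List.length_map]
    have hA : rest.foldl (fun s tile => s * 16 + (tile - (first + 0))) first
        = (rest.map (fun t => t - first)).foldl (fun s d => s * 16 + d) first := by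
      rw [List.foldl_map]
      simp
    rw [hA, pv_horner, List.length_map]
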